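-- pv_equiv track=rewrite | github.com/dos533/the-one | analysis/report.py | makeHist
-- ===== SOURCE A (Python) =====
-- def makeHist(d):
--     hist = {}
--     Groups = ['student', 'professor', 'barista']
--
--     for k in d:
--         hist[k] = {}
--         for g in Groups:
--             ans = 0
--             for v in d[k]:
--                 if g in v: ans += 1
--             hist[k][g] = ans
--
--     return hist
-- ===== SOURCE B (Python) =====
-- def makeHist(d):
--     hist = {}
--     for k, vs in d.items():
--         s = p = b = 0
--         for v in vs:
--             if 'student' in v: s += 1
--             if 'professor' in v: p += 1
--             if 'barista' in v: b += 1
--         hist[k] = {'student': s, 'professor': p, 'barista': b}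
--     return hist
-- ===== Notes on version B (the rewrite author's own statement) =====
-- stated objective: alternative
-- what changed: B makes a single pass over each key's list maintaining three running counters (one per group) instead of A's three separate rescans of d[k], one per group; the per-key result dict is built once from the counters.
import Mathlib
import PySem

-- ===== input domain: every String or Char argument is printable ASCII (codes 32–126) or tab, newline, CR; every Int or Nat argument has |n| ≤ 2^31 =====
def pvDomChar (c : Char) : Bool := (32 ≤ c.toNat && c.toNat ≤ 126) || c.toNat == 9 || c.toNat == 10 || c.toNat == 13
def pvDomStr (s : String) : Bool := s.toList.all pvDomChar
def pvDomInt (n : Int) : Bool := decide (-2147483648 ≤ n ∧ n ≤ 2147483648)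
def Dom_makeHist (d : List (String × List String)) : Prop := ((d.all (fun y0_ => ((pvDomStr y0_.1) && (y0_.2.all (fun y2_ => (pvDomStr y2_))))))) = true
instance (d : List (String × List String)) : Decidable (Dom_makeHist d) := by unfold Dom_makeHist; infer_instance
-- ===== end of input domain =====

-- B: one pass per key with three running counters instead of A's three rescans of d[k]; return-value equivalence on duplicate-free key lists.

-- ===== PORT A =====
-- 'd[k]' is ported as a dict lookup with unreachable default [] (k always comes from d itself)
def makeHist (d : List (String × List String)) : List (String × List (String × Int)) :=
  d.foldl (fun hist kv =>
    hist ++ [(kv.1,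
      (["student", "professor", "barista"]).foldl (fun inner g =>
        inner ++ [(g,
          ((PySem.Dict.mk d).getD kv.1 []).foldl
            (fun ans v => if PySem.Str.isIn g v then ans + 1 else ans) 0)]) [])]) []

-- ===== PORT B =====
def makeHist_alt (d : List (String × List String)) : List (String × List (String × Int)) :=
  d.map (fun kv =>
    let c := kv.2.foldl (fun (acc : Int × Int × Int) v =>
      ((if PySem.Str.isIn "student" v then acc.1 + 1 else acc.1),
       (if PySem.Str.isIn "professor" v then acc.2.1 + 1 else acc.2.1),
       (if PySem.Str.isIn "barista" v then acc.2.2 + 1 else acc.2.2))) (0, 0, 0)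
    (kv.1, [("student", c.1), ("professor", c.2.1), ("barista", c.2.2)]))

-- ===== PRECONDITION & SPEC =====
-- Pre_ excludes lists with duplicate keys: such a list does not represent a Python dict
-- (dict construction keeps the last value, the association-list encoding's lookup is first-match).
def Pre_makeHist (d : List (String × List String)) : Prop := (d.map Prod.fst).Nodup
instance (d : List (String × List String)) : Decidable (Pre_makeHist d) := by unfold Pre_makeHist; infer_instance
def pvWitness_makeHist : (List (String × List String)) := [("a", ["a student", "x"]), ("b", [])]
def Spec_makeHist (d : List (String × List String)) (out : List (String × List (String × Int))) : Prop := out = makeHist_alt d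
instance (d : List (String × List String)) (out : List (String × List (String × Int))) : Decidable (Spec_makeHist d out) := by unfold Spec_makeHist; infer_instance

-- ===== CLAIM (what is proved, stated in full; the proofs are below) =====
def Claim_equal_makeHist : Prop := ∀ (d : List (String × List String)), Dom_makeHist d → Pre_makeHist d → Spec_makeHist d (makeHist d)

-- ===== LEMMAS AND PROOFS =====

-- first-match lookup of a member key in a duplicate-free association list is its own value
theorem pv_lookup_self {d : List (String × List String)} {kv : String × List String}
    (hmem : kv ∈ d) (hnd : (d.map Prod.fst).Nodup) :
    (PySem.Dict.mk d).getD kv.1 [] = kv.2 := by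
  induction d with
  | nil => cases hmem
  | cons hd tl ih =>
    simp only [List.map_cons, List.nodup_cons] at hnd
    rcases List.mem_cons.mp hmem with h | h
    · subst h
      simp [PySem.Dict.getD, PySem.Dict.get?]
    · have hne : hd.1 ≠ kv.1 := by
        intro he
        exact hnd.1 (he ▸ List.mem_map_of_mem h)
      simp only [PySem.Dict.getD, PySem.Dict.get?]
      rw [List.find?_cons_of_neg (by simpa using hne)]
      simpa [PySem.Dict.getD, PySem.Dict.get?] using ih h hnd.2

-- B's single pass with three counters computes the three independent counts
theorem pv_triple (vs : List String) (s p b : Int) :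
    vs.foldl (fun (acc : Int × Int × Int) v =>
      ((if PySem.Str.isIn "student" v then acc.1 + 1 else acc.1),
       (if PySem.Str.isIn "professor" v then acc.2.1 + 1 else acc.2.1),
       (if PySem.Str.isIn "barista" v then acc.2.2 + 1 else acc.2.2))) (s, p, b)
    = (vs.foldl (fun ans v => if PySem.Str.isIn "student" v then ans + 1 else ans) s,
       vs.foldl (fun ans v => if PySem.Str.isIn "professor" v then ans + 1 else ans) p,
       vs.foldl (fun ans v => if PySem.Str.isIn "barista" v then ans + 1 else ans) b) := by
  induction vs generalizing s p b with
  | nil => rfl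
  | cons v vs ih => simp only [List.foldl_cons]; exact ih _ _ _

-- ===== VERDICT (by name: the statement is the Claim_ definition above) =====
theorem makeHist_spec : Claim_equal_makeHist := by
  intro d _ hpre
  unfold Spec_makeHist makeHist makeHist_alt
  rw [PySem.List.foldl_append_singleton_eq_map, List.nil_append]
  refine List.map_congr_left (fun kv hmem => ?_)
  rw [pv_lookup_self hmem hpre]
  simp only [List.foldl_cons, List.foldl_nil, List.nil_append, List.cons_append, pv_triple]
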